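-- pv_equiv track=rewrite | github.com/Shreyasingh1709/Smart-Medication-Reminder-and-Medicine-Expiry-Tracer-System | nlp_module.py | clean_ocr_text
-- ===== SOURCE A (Python) =====
-- def clean_ocr_text(text: str) -> str:
--     # Enhanced OCR error corrections (convert letters to digits where appropriate)
--     replacements = {
--         'I': '1', 'l': '1', '|': '1', 'T': '1',
--         'O': '0', 'Q': '0', 'D': '0', 'U': '0',
--         'S': '5', 'Z': '2',
--         'B': '8', 'G': '6',
--         'A': '4', 'E': '3',
--     }
--     for k, v in replacements.items():
--         text = text.replace(k, v)
--     return text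
-- ===== SOURCE B (Python) =====
-- def clean_ocr_text(text: str) -> str:
--     # Single pass over the characters: per-character dict lookup with identity default.
--     mapping = {
--         'I': '1', 'l': '1', '|': '1', 'T': '1',
--         'O': '0', 'Q': '0', 'D': '0', 'U': '0',
--         'S': '5', 'Z': '2',
--         'B': '8', 'G': '6',
--         'A': '4', 'E': '3',
--     }
--     return ''.join(mapping.get(c, c) for c in text)
-- ===== Notes on version B (the rewrite author's own statement) =====
-- stated objective: simpler
-- what changed: Replaced 14 sequential whole-string .replace passes with a single pass over the characters using one dict lookup (default = the char itself) per character.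
import Mathlib
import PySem

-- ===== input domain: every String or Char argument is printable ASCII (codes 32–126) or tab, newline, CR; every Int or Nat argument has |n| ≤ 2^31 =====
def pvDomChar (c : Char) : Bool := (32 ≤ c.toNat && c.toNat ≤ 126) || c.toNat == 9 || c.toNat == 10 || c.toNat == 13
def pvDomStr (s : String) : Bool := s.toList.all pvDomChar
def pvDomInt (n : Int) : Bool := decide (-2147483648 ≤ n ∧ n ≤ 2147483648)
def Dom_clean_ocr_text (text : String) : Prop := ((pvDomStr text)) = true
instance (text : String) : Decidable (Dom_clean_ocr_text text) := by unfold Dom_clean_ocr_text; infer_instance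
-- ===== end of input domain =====

-- B replaces A's 14 sequential whole-string replace passes by a single pass over the
-- characters with a per-character dict lookup defaulting to the char itself (objective: simpler).

-- ===== PORT A =====
-- the dict 'replacements', iterated with .items() in insertion order
def pvReplacements : List (String × String) :=
  [("I", "1"), ("l", "1"), ("|", "1"), ("T", "1"),
   ("O", "0"), ("Q", "0"), ("D", "0"), ("U", "0"),
   ("S", "5"), ("Z", "2"),
   ("B", "8"), ("G", "6"),
   ("A", "4"), ("E", "3")]

def clean_ocr_text (text : String) : String :=
  pvReplacements.foldl (fun t kv => PySem.Str.replace t kv.1 kv.2) text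

-- ===== PORT B =====
-- the dict 'mapping' of B, keyed by the single characters
def pvMapping : PySem.Dict Char Char :=
  PySem.Dict.mk
    [('I', '1'), ('l', '1'), ('|', '1'), ('T', '1'),
     ('O', '0'), ('Q', '0'), ('D', '0'), ('U', '0'),
     ('S', '5'), ('Z', '2'),
     ('B', '8'), ('G', '6'),
     ('A', '4'), ('E', '3')]

def clean_ocr_text_alt (text : String) : String :=
  PySem.Str.join "" ((text.toList.map (fun c => pvMapping.getD c c)).map (fun c => String.ofList [c]))

-- ===== PRECONDITION & SPEC =====
def Spec_clean_ocr_text (text : String) (out : String) : Prop := out = clean_ocr_text_alt text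
instance (text : String) (out : String) : Decidable (Spec_clean_ocr_text text out) := by unfold Spec_clean_ocr_text; infer_instance

-- ===== CLAIM (what is proved, stated in full; the proofs are below) =====
def Claim_equal_clean_ocr_text : Prop := ∀ (text : String), Dom_clean_ocr_text text → Spec_clean_ocr_text text (clean_ocr_text text)

-- ===== LEMMAS AND PROOFS =====

-- one single-character replacement step, as a function on characters
def fstep (k v c : Char) : Char := if c = k then v else c

-- replacing a single character by a single character is a map over the characters
theorem replace_single_go (k v : Char) :
    ∀ (l : List Char) (fuel : Nat) (acc : List Char), l.length ≤ fuel →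
      PySem.Chars.replace.go [k] [v] fuel l acc = acc.reverse ++ l.map (fstep k v) := by
  intro l
  induction l with
  | nil =>
    intro fuel acc _
    cases fuel <;> simp [PySem.Chars.replace.go]
  | cons c t ih =>
    intro fuel acc h
    cases fuel with
    | zero => simp at h
    | succ n =>
      simp only [PySem.Chars.replace.go]
      by_cases hck : c = k
      · subst hck
        rw [if_pos (by simp [List.isPrefixOf])]
        simp only [List.length_singleton, List.drop_succ_cons, List.drop_zero]
        rw [ih n _ (Nat.le_of_succ_le_succ (by simpa using h))]
        simp [fstep]
      · rw [if_neg (by simp [List.isPrefixOf]; intro h'; exact hck h'.symm)]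
        rw [ih n _ (Nat.le_of_succ_le_succ (by simpa using h))]
        simp [fstep, hck]

theorem replace_single (k v : Char) (s : List Char) :
    PySem.Chars.replace s [k] [v] = s.map (fstep k v) := by
  simp only [PySem.Chars.replace, List.isEmpty]
  rw [replace_single_go k v s s.length [] (le_refl _)]
  simp

-- the cascade of A's fourteen per-character steps agrees with B's single lookup
theorem pointwise (c : Char) :
    fstep 'E' '3' (fstep 'A' '4' (fstep 'G' '6' (fstep 'B' '8' (fstep 'Z' '2'
      (fstep 'S' '5' (fstep 'U' '0' (fstep 'D' '0' (fstep 'Q' '0' (fstep 'O' '0'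
      (fstep 'T' '1' (fstep '|' '1' (fstep 'l' '1' (fstep 'I' '1' c)))))))))))))
      = pvMapping.getD c c := by
  by_cases h1 : c = 'I'; · subst h1; decide
  by_cases h2 : c = 'l'; · subst h2; decide
  by_cases h3 : c = '|'; · subst h3; decide
  by_cases h4 : c = 'T'; · subst h4; decide
  by_cases h5 : c = 'O'; · subst h5; decide
  by_cases h6 : c = 'Q'; · subst h6; decide
  by_cases h7 : c = 'D'; · subst h7; decide
  by_cases h8 : c = 'U'; · subst h8; decide
  by_cases h9 : c = 'S'; · subst h9; decide
  by_cases h10 : c = 'Z'; · subst h10; decide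
  by_cases h11 : c = 'B'; · subst h11; decide
  by_cases h12 : c = 'G'; · subst h12; decide
  by_cases h13 : c = 'A'; · subst h13; decide
  by_cases h14 : c = 'E'; · subst h14; decide
  simp [fstep, pvMapping, PySem.Dict.getD, PySem.Dict.get?,
        h1, h2, h3, h4, h5, h6, h7, h8, h9, h10, h11, h12, h13, h14,
        Ne.symm h1, Ne.symm h2, Ne.symm h3, Ne.symm h4, Ne.symm h5, Ne.symm h6, Ne.symm h7,
        Ne.symm h8, Ne.symm h9, Ne.symm h10, Ne.symm h11, Ne.symm h12, Ne.symm h13, Ne.symm h14]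

-- A's fourteen whole-list passes collapse to one pass with the lookup function
theorem map_replace_chain (s : List Char) :
    ((((((((((((((s.map (fstep 'I' '1')).map (fstep 'l' '1')).map (fstep '|' '1')).map
      (fstep 'T' '1')).map (fstep 'O' '0')).map (fstep 'Q' '0')).map (fstep 'D' '0')).map
      (fstep 'U' '0')).map (fstep 'S' '5')).map (fstep 'Z' '2')).map (fstep 'B' '8')).map
      (fstep 'G' '6')).map (fstep 'A' '4')).map (fstep 'E' '3'))
      = s.map (fun c => pvMapping.getD c c) := by
  induction s with
  | nil => simp
  | cons c t ih =>
    simp only [List.map_cons]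
    rw [ih, pointwise c]

-- ===== VERDICT (by name: the statement is the Claim_ definition above) =====
theorem clean_ocr_text_spec : Claim_equal_clean_ocr_text := by
  intro text _
  unfold Spec_clean_ocr_text clean_ocr_text clean_ocr_text_alt pvReplacements
  rw [← String.toList_inj]
  simp only [List.foldl_cons, List.foldl_nil]
  simp only [PySem.Str.toList_replace, PySem.Str.toList_join]
  rw [show "I".toList = ['I'] from rfl, show "l".toList = ['l'] from rfl,
      show "|".toList = ['|'] from rfl, show "T".toList = ['T'] from rfl,
      show "O".toList = ['O'] from rfl, show "Q".toList = ['Q'] from rfl,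
      show "D".toList = ['D'] from rfl, show "U".toList = ['U'] from rfl,
      show "S".toList = ['S'] from rfl, show "Z".toList = ['Z'] from rfl,
      show "B".toList = ['B'] from rfl, show "G".toList = ['G'] from rfl,
      show "A".toList = ['A'] from rfl, show "E".toList = ['E'] from rfl,
      show "1".toList = ['1'] from rfl, show "0".toList = ['0'] from rfl,
      show "5".toList = ['5'] from rfl, show "2".toList = ['2'] from rfl,
      show "8".toList = ['8'] from rfl, show "6".toList = ['6'] from rfl,
      show "4".toList = ['4'] from rfl, show "3".toList = ['3'] from rfl,
      show "".toList = ([] : List Char) from rfl]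
  simp only [replace_single]
  rw [map_replace_chain]
  have hsing : List.map String.toList
        (List.map (fun c => String.ofList [c]) (List.map (fun c => pvMapping.getD c c) text.toList))
      = (text.toList.map (fun c => pvMapping.getD c c)).map (fun c => [c]) := by
    simp
  rw [hsing, PySem.Chars.join_nil_singletons]
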